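-- pv_equiv track=rewrite | github.com/naokit1928/komenoichi | app_v2/notifications/services/line_notification_service.py | _aggregate_rice_items
-- ===== SOURCE A (Python) =====
-- from typing import Any, Dict, Optional, Tuple, List
--
-- def _aggregate_rice_items(
--
--     items: Any,
-- ) -> Tuple[int, int, int, int, int, int]:
--
--     qty_5 = qty_10 = qty_25 = 0
--     subtotal_5 = subtotal_10 = subtotal_25 = 0
--
--     if not isinstance(items, list):
--         return qty_5, qty_10, qty_25, subtotal_5, subtotal_10, subtotal_25
--
--     for item in items:
--         try:
--             size = int(item.get("size_kg"))
--             q = int(item.get("quantity") or 0)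
--             line_total = item.get("line_total")
--             if line_total is None:
--                 line_total = item.get("subtotal")
--             s = int(line_total or 0)
--         except Exception:
--             continue
--
--         if size == 5:
--             qty_5 += q
--             subtotal_5 += s
--         elif size == 10:
--             qty_10 += q
--             subtotal_10 += s
--         elif size == 25:
--             qty_25 += q
--             subtotal_25 += s
--
--     return qty_5, qty_10, qty_25, subtotal_5, subtotal_10, subtotal_25
-- ===== SOURCE B (Python) =====
-- from typing import Any, Tuple
--
--
-- def _parse_rice_item(item: Any):
--     """Normalize one item to (size, quantity, subtotal); None if the item is invalid."""
--     try:
--         size = int(item.get("size_kg"))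
--         q = int(item.get("quantity") or 0)
--         line_total = item.get("line_total")
--         if line_total is None:
--             line_total = item.get("subtotal")
--         s = int(line_total or 0)
--     except Exception:
--         return None
--     return (size, q, s)
--
--
-- def _aggregate_rice_items(
--     items: Any,
-- ) -> Tuple[int, int, int, int, int, int]:
--     if not isinstance(items, list):
--         return 0, 0, 0, 0, 0, 0
--     # phase 1: parse every item, keeping only the valid ones
--     entries = [t for t in map(_parse_rice_item, items) if t is not None]
--     # phase 2: aggregate per size category
--     def agg(size):
--         return (sum(q for sz, q, _ in entries if sz == size),
--                 sum(s for sz, _, s in entries if sz == size))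
--     q5, s5 = agg(5)
--     q10, s10 = agg(10)
--     q25, s25 = agg(25)
--     return q5, q10, q25, s5, s10, s25
-- ===== Notes on version B (the rewrite author's own statement) =====
-- stated objective: alternative
-- what changed: Replaced A's single loop with six running scalar accumulators by a two-phase pipeline: first normalize every item into a (size, quantity, subtotal) tuple (skipping invalid ones), then aggregate per size category with filtered comprehension sums.
import Mathlib
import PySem

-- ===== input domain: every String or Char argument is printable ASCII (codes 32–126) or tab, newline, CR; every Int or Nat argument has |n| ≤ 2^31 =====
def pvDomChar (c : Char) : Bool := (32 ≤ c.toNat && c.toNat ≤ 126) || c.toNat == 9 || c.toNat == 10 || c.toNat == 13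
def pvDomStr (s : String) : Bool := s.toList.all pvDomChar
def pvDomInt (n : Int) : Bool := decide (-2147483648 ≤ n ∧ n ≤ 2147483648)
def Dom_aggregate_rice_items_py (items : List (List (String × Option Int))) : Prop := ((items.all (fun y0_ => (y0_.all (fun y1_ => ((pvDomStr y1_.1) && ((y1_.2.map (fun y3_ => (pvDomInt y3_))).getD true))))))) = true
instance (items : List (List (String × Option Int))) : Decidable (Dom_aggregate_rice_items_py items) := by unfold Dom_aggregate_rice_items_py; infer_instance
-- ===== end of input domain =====

-- B re-implements A as a two-phase parse-then-aggregate (normalize items, then per-size sums); objective: alternative decomposition, same cost.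


-- ===== PORT A =====
-- dict.get(k) on a dict[str, Optional[int]]: first match in the association list, None if missing (missing and a stored None both yield none)
def pvDictGetV (d : List (String × Option Int)) (k : String) : Option Int :=
  match d.find? (fun p => p.1 == k) with
  | some p => p.2
  | none => none

def aggregate_rice_items_py (items : List (List (String × Option Int))) : Int × Int × Int × Int × Int × Int :=
  items.foldl (fun acc item =>
    -- try: int(item.get("size_kg")) raises (skipping the item) exactly when the value is None
    match pvDictGetV item "size_kg" with
    | none => acc
    | some size =>
      let q : Int := (pvDictGetV item "quantity").getD 0        -- int(... or 0)
      let lt : Option Int :=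
        match pvDictGetV item "line_total" with
        | none => pvDictGetV item "subtotal"
        | some v => some v
      let s : Int := lt.getD 0
      if size = 5 then (acc.1 + q, acc.2.1, acc.2.2.1, acc.2.2.2.1 + s, acc.2.2.2.2.1, acc.2.2.2.2.2)
      else if size = 10 then (acc.1, acc.2.1 + q, acc.2.2.1, acc.2.2.2.1, acc.2.2.2.2.1 + s, acc.2.2.2.2.2)
      else if size = 25 then (acc.1, acc.2.1, acc.2.2.1 + q, acc.2.2.2.1, acc.2.2.2.2.1, acc.2.2.2.2.2 + s)
      else acc) (0, 0, 0, 0, 0, 0)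

-- ===== PORT B =====
-- phase 1: normalize one item to (size, quantity, subtotal); none if invalid (int(None) would raise)
def pvParseRiceItem (item : List (String × Option Int)) : Option (Int × Int × Int) :=
  match pvDictGetV item "size_kg" with
  | none => none
  | some size =>
    let q : Int := (pvDictGetV item "quantity").getD 0
    let lt : Option Int :=
      match pvDictGetV item "line_total" with
      | none => pvDictGetV item "subtotal"
      | some v => some v
    some (size, q, lt.getD 0)

-- phase 2: per-size aggregation of the parsed entries
def pvAgg (entries : List (Int × Int × Int)) (size : Int) : Int × Int :=
  (((entries.filter (fun e => e.1 == size)).map (fun e => e.2.1)).sum,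
   ((entries.filter (fun e => e.1 == size)).map (fun e => e.2.2)).sum)

def aggregate_rice_items_py_alt (items : List (List (String × Option Int))) : Int × Int × Int × Int × Int × Int :=
  let entries := items.filterMap pvParseRiceItem
  let p5 := pvAgg entries 5
  let p10 := pvAgg entries 10
  let p25 := pvAgg entries 25
  (p5.1, p10.1, p25.1, p5.2, p10.2, p25.2)

-- ===== PRECONDITION & SPEC =====
def Spec_aggregate_rice_items_py (items : List (List (String × Option Int))) (out : Int × Int × Int × Int × Int × Int) : Prop := out = aggregate_rice_items_py_alt items
instance (items : List (List (String × Option Int))) (out : Int × Int × Int × Int × Int × Int) : Decidable (Spec_aggregate_rice_items_py items out) := by unfold Spec_aggregate_rice_items_py; infer_instance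

-- ===== CLAIM (what is proved, stated in full; the proofs are below) =====
def Claim_equal_aggregate_rice_items_py : Prop := ∀ (items : List (List (String × Option Int))), Dom_aggregate_rice_items_py items → Spec_aggregate_rice_items_py items (aggregate_rice_items_py items)

-- ===== LEMMAS AND PROOFS =====

-- A's loop body, named for the proofs
def pvStepA (acc : Int × Int × Int × Int × Int × Int) (item : List (String × Option Int)) : Int × Int × Int × Int × Int × Int :=
  match pvDictGetV item "size_kg" with
  | none => acc
  | some size =>
    let q : Int := (pvDictGetV item "quantity").getD 0
    let lt : Option Int :=
      match pvDictGetV item "line_total" with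
      | none => pvDictGetV item "subtotal"
      | some v => some v
    let s : Int := lt.getD 0
    if size = 5 then (acc.1 + q, acc.2.1, acc.2.2.1, acc.2.2.2.1 + s, acc.2.2.2.2.1, acc.2.2.2.2.2)
    else if size = 10 then (acc.1, acc.2.1 + q, acc.2.2.1, acc.2.2.2.1, acc.2.2.2.2.1 + s, acc.2.2.2.2.2)
    else if size = 25 then (acc.1, acc.2.1, acc.2.2.1 + q, acc.2.2.2.1, acc.2.2.2.2.1, acc.2.2.2.2.2 + s)
    else acc

lemma pvStepA_eq_parse (acc : Int × Int × Int × Int × Int × Int) (item : List (String × Option Int)) :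
    pvStepA acc item =
      match pvParseRiceItem item with
      | none => acc
      | some (size, q, s) =>
        if size = 5 then (acc.1 + q, acc.2.1, acc.2.2.1, acc.2.2.2.1 + s, acc.2.2.2.2.1, acc.2.2.2.2.2)
        else if size = 10 then (acc.1, acc.2.1 + q, acc.2.2.1, acc.2.2.2.1, acc.2.2.2.2.1 + s, acc.2.2.2.2.2)
        else if size = 25 then (acc.1, acc.2.1, acc.2.2.1 + q, acc.2.2.2.1, acc.2.2.2.2.1, acc.2.2.2.2.2 + s)
        else acc := by
  unfold pvStepA pvParseRiceItem
  cases pvDictGetV item "size_kg" <;> rfl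

def pvAdd6 (a b : Int × Int × Int × Int × Int × Int) : Int × Int × Int × Int × Int × Int :=
  (a.1 + b.1, a.2.1 + b.2.1, a.2.2.1 + b.2.2.1, a.2.2.2.1 + b.2.2.2.1, a.2.2.2.2.1 + b.2.2.2.2.1, a.2.2.2.2.2 + b.2.2.2.2.2)

def pvAggAll (entries : List (Int × Int × Int)) : Int × Int × Int × Int × Int × Int :=
  ((pvAgg entries 5).1, (pvAgg entries 10).1, (pvAgg entries 25).1,
   (pvAgg entries 5).2, (pvAgg entries 10).2, (pvAgg entries 25).2)

lemma pvFoldA_eq (items : List (List (String × Option Int))) :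
    ∀ acc, items.foldl pvStepA acc = pvAdd6 acc (pvAggAll (items.filterMap pvParseRiceItem)) := by
  induction items with
  | nil =>
    intro acc
    simp [pvAggAll, pvAgg, pvAdd6]
  | cons item rest ih =>
    intro acc
    simp only [List.foldl_cons, List.filterMap_cons]
    rw [pvStepA_eq_parse]
    cases hp : pvParseRiceItem item with
    | none => simp [ih]
    | some e =>
      obtain ⟨size, q, s⟩ := e
      rw [ih]
      obtain ⟨a1, a2, a3, a4, a5, a6⟩ := acc
      by_cases h5 : size = 5 <;> by_cases h10 : size = 10 <;> by_cases h25 : size = 25 <;>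
        simp [pvAdd6, pvAggAll, pvAgg, h5, h10, h25] <;> omega

-- ===== VERDICT (by name: the statement is the Claim_ definition above) =====
theorem aggregate_rice_items_py_spec : Claim_equal_aggregate_rice_items_py := by
  intro items _
  show aggregate_rice_items_py items = aggregate_rice_items_py_alt items
  have h : aggregate_rice_items_py items = items.foldl pvStepA (0, 0, 0, 0, 0, 0) := rfl
  rw [h, pvFoldA_eq]
  simp [pvAdd6, pvAggAll, aggregate_rice_items_py_alt]
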